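-- pv_equiv track=rewrite | github.com/MatveyChvikov/BD_spec_lab_05 | backend/app/tests/conftest.py | _split_postgres_statements
-- ===== SOURCE A (Python) =====
-- def _strip_sql_line_comments(sql: str) -> str:
--     lines = []
--     for line in sql.splitlines():
--         stripped = line.strip()
--         if stripped.startswith("--"):
--             continue
--         lines.append(line)
--     return "\n".join(lines)
--
-- def _split_postgres_statements(script: str) -> list[str]:
--     """Делит SQL по ';' вне тела $$ ... $$ (для миграций с plpgsql)."""
--     s = _strip_sql_line_comments(script)
--     parts: list[str] = []
--     buf: list[str] = []
--     in_dollar = False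
--     i = 0
--     while i < len(s):
--         if s.startswith("$$", i):
--             in_dollar = not in_dollar
--             buf.append("$$")
--             i += 2
--             continue
--         ch = s[i]
--         if ch == ";" and not in_dollar:
--             stmt = "".join(buf).strip()
--             if stmt:
--                 parts.append(stmt)
--             buf = []
--             i += 1
--             continue
--         buf.append(ch)
--         i += 1
--     tail = "".join(buf).strip()
--     if tail:
--         parts.append(tail)
--     return parts
-- ===== SOURCE B (Python) =====
-- def _strip_sql_line_comments(sql: str) -> str:
--     lines = []
--     for line in sql.splitlines():
--         stripped = line.strip()
--         if stripped.startswith("--"):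
--             continue
--         lines.append(line)
--     return "\n".join(lines)
--
--
-- def _split_postgres_statements(script: str) -> list[str]:
--     """Split on '$$' once, then alternate: even chunks are split on ';', odd chunks pass verbatim."""
--     s = _strip_sql_line_comments(script)
--     parts: list[str] = []
--     buf = ""
--     in_dollar = False
--     first = True
--     for chunk in s.split("$$"):
--         if not first:
--             buf += "$$"
--         first = False
--         if in_dollar:
--             buf += chunk
--         else:
--             pieces = chunk.split(";")
--             for piece in pieces[:-1]:
--                 stmt = (buf + piece).strip()
--                 if stmt:
--                     parts.append(stmt)
--                 buf = ""
--             buf += pieces[-1]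
--         in_dollar = not in_dollar
--     tail = buf.strip()
--     if tail:
--         parts.append(tail)
--     return parts
-- ===== Notes on version B (the rewrite author's own statement) =====
-- stated objective: faster
-- what changed: B replaces A's character-by-character scan with a toggling in_dollar flag by splitting the comment-stripped script once on the dollar-quote delimiter and then, alternating chunk parity, splitting even chunks on the statement separator while passing odd (dollar-quoted) chunks through verbatim.
import Mathlib
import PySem

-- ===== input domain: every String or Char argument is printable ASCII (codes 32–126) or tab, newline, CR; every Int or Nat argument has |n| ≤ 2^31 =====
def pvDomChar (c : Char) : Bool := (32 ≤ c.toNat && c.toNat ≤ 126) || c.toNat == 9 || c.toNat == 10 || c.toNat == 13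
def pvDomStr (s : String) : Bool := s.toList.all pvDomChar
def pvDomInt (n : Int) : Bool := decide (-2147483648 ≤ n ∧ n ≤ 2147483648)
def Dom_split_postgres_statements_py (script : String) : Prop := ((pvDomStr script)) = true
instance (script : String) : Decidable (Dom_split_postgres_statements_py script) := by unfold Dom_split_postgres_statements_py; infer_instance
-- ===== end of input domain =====

-- B splits the script once on "$$" and the even-parity chunks on ";" instead of A's char-by-char toggling scan; same results, measured faster (bulk splits vs a per-character loop).

-- shared helper: _strip_sql_line_comments (identical in Source A and Source B)
def pvStripComments (sql : String) : String :=
  PySem.Str.join "\n"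
    ((PySem.Str.splitlines sql).foldl
      (fun lines line =>
        if PySem.Str.startswith (PySem.Str.strip line) "--" then lines else lines ++ [line]) [])

-- ===== PORT A =====
-- A's while-loop over indices i, as recursion on the remaining characters cs = s[i:];
-- `s.startswith("$$", i)` is "head is '$' and the next char is '$'", and `i += 2` drops both.
def pvLoopA (cs : List Char) (buf parts : List String) (in_dollar : Bool) : List String :=
  match cs with
  | [] =>
      let tail := PySem.Str.strip (PySem.Str.join "" buf)
      if tail = "" then parts else parts ++ [tail]
  | c :: rest =>
      if c = '$' ∧ rest.head? = some '$' then
        pvLoopA rest.tail (buf ++ ["$$"]) parts (!in_dollar)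
      else if c = ';' ∧ in_dollar = false then
        let stmt := PySem.Str.strip (PySem.Str.join "" buf)
        pvLoopA rest [] (if stmt = "" then parts else parts ++ [stmt]) in_dollar
      else
        pvLoopA rest (buf ++ [c.toString]) parts in_dollar
termination_by cs.length
decreasing_by all_goals simp [List.length_tail]

def split_postgres_statements_py (script : String) : List String :=
  pvLoopA (pvStripComments script).toList [] [] false

-- ===== PORT B =====
-- hand port of Python str.split("$$") (leftmost, non-overlapping): first chunk plus remaining chunks
def pvSplitDD (cs : List Char) : List Char × List (List Char) :=
  match cs with
  | [] => ([], [])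
  | c :: rest =>
      if c = '$' ∧ rest.head? = some '$' then
        let (h, t) := pvSplitDD rest.tail
        ([], h :: t)
      else
        let (h, t) := pvSplitDD rest
        (c :: h, t)
termination_by cs.length
decreasing_by all_goals simp [List.length_tail]

-- hand port of Python chunk.split(";"): first piece plus remaining pieces
def pvSplitSemi (cs : List Char) : List Char × List (List Char) :=
  match cs with
  | [] => ([], [])
  | c :: rest =>
      if c = ';' then
        let (h, t) := pvSplitSemi rest
        ([], h :: t)
      else
        let (h, t) := pvSplitSemi rest
        (c :: h, t)

-- Source B's inner loop: emit every piece but the last, keep the last in the buffer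
def pvEmit : List Char → List (List Char) → List Char → List String → List Char × List String
  | p, [], buf, parts => (buf ++ p, parts)
  | p, q :: rest, buf, parts =>
      let stmt := PySem.Chars.strip (buf ++ p)
      pvEmit q rest [] (if stmt = [] then parts else parts ++ [String.ofList stmt])

-- Source B's chunk loop, state (in_dollar, first, buf, parts)
def pvLoopB : List (List Char) → Bool → Bool → List Char → List String → List String
  | [], _, _, buf, parts =>
      let tail := PySem.Chars.strip buf
      if tail = [] then parts else parts ++ [String.ofList tail]
  | c :: rest, in_dollar, first, buf, parts =>
      let buf1 := if first then buf else buf ++ ['$', '$']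
      let (buf2, parts2) :=
        if in_dollar then (buf1 ++ c, parts)
        else
          let (h, t) := pvSplitSemi c
          pvEmit h t buf1 parts
      pvLoopB rest (!in_dollar) false buf2 parts2

def split_postgres_statements_py_alt (script : String) : List String :=
  let s := pvStripComments script
  let (h, t) := pvSplitDD s.toList
  pvLoopB (h :: t) false true [] []

-- ===== PRECONDITION & SPEC =====
def Spec_split_postgres_statements_py (script : String) (out : List String) : Prop := out = split_postgres_statements_py_alt script
instance (script : String) (out : List String) : Decidable (Spec_split_postgres_statements_py script out) := by unfold Spec_split_postgres_statements_py; infer_instance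

-- ===== CLAIM (what is proved, stated in full; the proofs are below) =====
def Claim_equal_split_postgres_statements_py : Prop := ∀ (script : String), Dom_split_postgres_statements_py script → Spec_split_postgres_statements_py script (split_postgres_statements_py script)

-- ===== LEMMAS AND PROOFS =====

-- A's buffer (list of strings joined by "") corresponds to B's char buffer
def pvFlat (buf : List String) : List Char := (buf.map String.toList).flatten

theorem pvFlatten_intersperse_nil (l : List (List Char)) :
    (List.intersperse ([] : List Char) l).flatten = l.flatten := by
  induction l with
  | nil => rfl
  | cons a t ih =>
    cases t with
    | nil => rfl
    | cons b t2 => simp only [List.intersperse] at ih ⊢; simp [ih]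

theorem pvStrip_join (buf : List String) :
    PySem.Str.strip (PySem.Str.join "" buf) = String.ofList (PySem.Chars.strip (pvFlat buf)) := by
  have h : PySem.Chars.strip (PySem.Str.join "" buf).toList = PySem.Chars.strip (pvFlat buf) := by
    simp [PySem.Str.toList_join, PySem.Chars.join, pvFlat, List.intercalate,
      pvFlatten_intersperse_nil]
  rw [← h, ← PySem.Str.toList_strip, String.ofList_toList]

theorem pvFlat_append (buf : List String) (s : String) :
    pvFlat (buf ++ [s]) = pvFlat buf ++ s.toList := by
  simp [pvFlat]

theorem pvEmit_cons (c : Char) (p : List Char) (ps : List (List Char)) (buf : List Char)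
    (parts : List String) :
    pvEmit (c :: p) ps buf parts = pvEmit p ps (buf ++ [c]) parts := by
  cases ps <;> simp [pvEmit]

theorem pvSplitSemi_cons_ne (c : Char) (rest : List Char) (hc : ¬ c = ';') :
    pvSplitSemi (c :: rest) = ((c :: (pvSplitSemi rest).1), (pvSplitSemi rest).2) := by
  simp [pvSplitSemi, hc]

-- one step of B's chunk loop with first = false re-stated with the "$$" already in the buffer
theorem pvLoopB_first_false (c : List Char) (rest : List (List Char)) (d : Bool)
    (buf : List Char) (parts : List String) :
    pvLoopB (c :: rest) d false buf parts = pvLoopB (c :: rest) d true (buf ++ ['$', '$']) parts := by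
  simp [pvLoopB]

-- the main invariant: A's scan of cs equals B's chunk loop over split(cs, "$$"),
-- from any buffer/parts/in_dollar state
theorem pvMain (cs : List Char) : ∀ (bufA : List String) (parts : List String) (d : Bool),
    pvLoopA cs bufA parts d =
      pvLoopB ((pvSplitDD cs).1 :: (pvSplitDD cs).2) d true (pvFlat bufA) parts := by
  induction cs using pvSplitDD.induct with
  | case1 =>
    intro bufA parts d
    simp only [pvLoopA, pvSplitDD, pvLoopB, pvSplitSemi, pvEmit, List.append_nil]
    cases d <;> simp [pvStrip_join]
  | case2 c rest hdd h t heq ih =>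
    intro bufA parts d
    have e1 : pvSplitDD (c :: rest) = ([], h :: t) := by rw [pvSplitDD, if_pos hdd, heq]
    rw [pvLoopA, if_pos hdd, e1, ih, heq]
    conv_rhs => rw [pvLoopB]
    cases d <;>
      simp [pvSplitSemi, pvEmit, pvLoopB_first_false, pvFlat_append]
  | case3 c rest hdd h t heq ih =>
    intro bufA parts d
    have e1 : pvSplitDD (c :: rest) = (c :: h, t) := by rw [pvSplitDD, if_neg hdd, heq]
    rw [pvLoopA, if_neg hdd, e1]
    cases d with
    | true =>
      rw [if_neg (by simp), ih, heq]
      conv_lhs => rw [pvLoopB]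
      conv_rhs => rw [pvLoopB]
      simp [pvFlat_append]
    | false =>
      by_cases hc : c = ';'
      · subst hc
        rw [if_pos ⟨rfl, rfl⟩, ih, heq]
        conv_lhs => rw [pvLoopB]
        conv_rhs => rw [pvLoopB]
        simp only [pvSplitSemi, if_true]
        simp [pvEmit, pvFlat, pvStrip_join]
      · rw [if_neg (by simp [hc]), ih, heq]
        conv_lhs => rw [pvLoopB]
        conv_rhs => rw [pvLoopB]
        simp [pvSplitSemi_cons_ne _ _ hc, pvEmit_cons, pvFlat_append]

-- ===== VERDICT (by name: the statement is the Claim_ definition above) =====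
theorem split_postgres_statements_py_spec : Claim_equal_split_postgres_statements_py := by
  intro script _
  unfold Spec_split_postgres_statements_py
  unfold split_postgres_statements_py split_postgres_statements_py_alt
  rw [pvMain]
  rfl
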